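-- pv_equiv track=rewrite | github.com/RuobinGao/MonoAGP | model/DPP_Core.py | _build_stage_bins
-- ===== SOURCE A (Python) =====
-- def _build_stage_bins(max_num_bins: int, num_stages: int):
--     factors = []
--     for k in range(num_stages - 1, -1, -1):
--         f = 2 ** k
--         while f > 1 and max_num_bins % f != 0:
--             f //= 2
--         factors.append(f)
--
--     factors = sorted(set(factors), reverse=True)
--     if factors[-1] != 1:
--         factors.append(1)
--
--     stage_bins = [max_num_bins // f for f in factors]
--     stage_bins = sorted(set(stage_bins))
--     return stage_bins
-- ===== SOURCE B (Python) =====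
-- def _build_stage_bins(max_num_bins: int, num_stages: int):
--     factors = []
--     f = 1
--     for _ in range(num_stages):
--         if max_num_bins % f == 0:
--             factors.append(f)
--         f *= 2
--     return sorted({max_num_bins // f for f in factors})
-- ===== Notes on version B (the rewrite author's own statement) =====
-- stated objective: faster
-- what changed: Replaces A's descending outer loop with an inner halving while-loop (plus a descending sort and conditional append of 1) by a single ascending pass that doubles f and keeps the powers of two dividing max_num_bins, then sorts the set of quotients directly.
import Mathlib
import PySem

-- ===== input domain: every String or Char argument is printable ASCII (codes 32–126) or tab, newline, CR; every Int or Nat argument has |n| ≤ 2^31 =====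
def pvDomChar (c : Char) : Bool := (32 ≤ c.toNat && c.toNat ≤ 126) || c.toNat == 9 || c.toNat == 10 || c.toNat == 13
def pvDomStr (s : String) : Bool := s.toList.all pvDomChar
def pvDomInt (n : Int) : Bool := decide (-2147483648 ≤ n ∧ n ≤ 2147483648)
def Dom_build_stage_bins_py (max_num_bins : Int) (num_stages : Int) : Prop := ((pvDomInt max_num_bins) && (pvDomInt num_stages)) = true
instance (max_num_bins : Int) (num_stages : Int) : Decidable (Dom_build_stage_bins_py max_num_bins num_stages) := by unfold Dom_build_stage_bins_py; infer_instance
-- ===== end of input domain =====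

-- B replaces A's descending loop with inner halving (and sort/append-1 fixups) by one ascending
-- doubling pass collecting the dividing powers of two; objective: simpler.

-- ===== PORT A =====
-- inner 'while f > 1 and max_num_bins % f != 0: f //= 2'
def pvReduceF (m f : Int) : Int :=
  if h : 1 < f ∧ PySem.Int.mod m f ≠ 0 then pvReduceF m (PySem.Int.floordiv f 2) else f
termination_by f.toNat
decreasing_by
  rw [PySem.Int.floordiv_eq_ediv_of_pos (by omega : (0:Int) < 2)]
  omega

def build_stage_bins_py (max_num_bins : Int) (num_stages : Int) : List Int :=
  -- every k yielded by range(num_stages-1, -1, -1) is ≥ 0, so Python's 2 ** k is exactly 2 ^ k.toNat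
  let factors := (PySem.List.pyRange (num_stages - 1) (-1) (-1)).foldl
      (fun acc k => acc ++ [pvReduceF max_num_bins (2 ^ k.toNat)]) []
  let factors' := PySem.List.sorted (PySem.Set.ofList factors) (fun x => x) true
  let factors'' :=
    match PySem.List.pyGet? factors' (-1) with
    | none => []        -- Python raises IndexError here (only when num_stages ≤ 0); excluded by Pre_
    | some last => if last ≠ 1 then factors' ++ [1] else factors'
  let stage_bins := factors''.map (fun f => PySem.Int.floordiv max_num_bins f)
  PySem.List.sorted (PySem.Set.ofList stage_bins) (fun x => x) false

-- ===== PORT B =====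
def build_stage_bins_py_alt (max_num_bins : Int) (num_stages : Int) : List Int :=
  let st := (PySem.List.pyRange 0 num_stages 1).foldl
      (fun (st : List Int × Int) _ =>
        ((if PySem.Int.mod max_num_bins st.2 = 0 then st.1 ++ [st.2] else st.1), st.2 * 2))
      ([], 1)
  PySem.List.sorted
    (PySem.Set.ofList (st.1.map (fun f => PySem.Int.floordiv max_num_bins f))) (fun x => x) false

-- ===== PRECONDITION & SPEC =====
-- A raises IndexError (factors[-1] on the empty list) exactly when num_stages ≤ 0
def Pre_build_stage_bins_py (max_num_bins : Int) (num_stages : Int) : Prop := 1 ≤ num_stages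
instance (max_num_bins : Int) (num_stages : Int) : Decidable (Pre_build_stage_bins_py max_num_bins num_stages) := by unfold Pre_build_stage_bins_py; infer_instance
def pvWitness_build_stage_bins_py : Int × Int := (12, 3)

def Spec_build_stage_bins_py (max_num_bins : Int) (num_stages : Int) (out : List Int) : Prop := out = build_stage_bins_py_alt max_num_bins num_stages
instance (max_num_bins : Int) (num_stages : Int) (out : List Int) : Decidable (Spec_build_stage_bins_py max_num_bins num_stages out) := by unfold Spec_build_stage_bins_py; infer_instance

-- ===== CLAIM (what is proved, stated in full; the proofs are below) =====
def Claim_equal_build_stage_bins_py : Prop := ∀ (max_num_bins : Int) (num_stages : Int), Dom_build_stage_bins_py max_num_bins num_stages → Pre_build_stage_bins_py max_num_bins num_stages → Spec_build_stage_bins_py max_num_bins num_stages (build_stage_bins_py max_num_bins num_stages)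
-- ===== LEMMAS AND PROOFS =====

lemma pvReduceF_of_dvd (m f : Int) (h : f ∣ m) : pvReduceF m f = f := by
  have hm : PySem.Int.mod m f = 0 := (PySem.Int.mod_eq_zero_iff_dvd m f).mpr h
  rw [pvReduceF, dif_neg]
  rintro ⟨-, h2⟩; exact h2 hm

lemma pvReduceF_pow (m : Int) (k : Nat) :
    ∃ j, j ≤ k ∧ pvReduceF m (2 ^ k) = 2 ^ j ∧ (2:Int) ^ j ∣ m := by
  induction k with
  | zero =>
    exact ⟨0, le_refl _, pvReduceF_of_dvd m _ (by simp), by simp⟩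
  | succ k ih =>
    by_cases h : (2:Int) ^ (k + 1) ∣ m
    · exact ⟨k + 1, le_refl _, pvReduceF_of_dvd m _ h, h⟩
    · obtain ⟨j, hj, he, hd⟩ := ih
      refine ⟨j, Nat.le_succ_of_le hj, ?_, hd⟩
      have hlt : (1:Int) < 2 ^ (k + 1) := by
        have h2 : (2:Int) ^ (k + 1) = 2 ^ k * 2 := pow_succ 2 k
        have h1 : (0:Int) < 2 ^ k := pow_pos (by norm_num) k
        omega
      have hmod : PySem.Int.mod m (2 ^ (k + 1)) ≠ 0 := by
        simpa [PySem.Int.mod_eq_zero_iff_dvd] using h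
      rw [pvReduceF, dif_pos ⟨hlt, hmod⟩]
      have h2 : PySem.Int.floordiv ((2:Int) ^ (k + 1)) 2 = 2 ^ k := by
        rw [PySem.Int.floordiv_eq_ediv_of_pos (by omega), pow_succ]
        exact Int.mul_ediv_cancel _ (by norm_num)
      rw [h2]; exact he

lemma pv_loopB (m : Int) (l : List Int) (acc : List Int) (c : Int) :
    (l.foldl (fun (st : List Int × Int) _ =>
        ((if PySem.Int.mod m st.2 = 0 then st.1 ++ [st.2] else st.1), st.2 * 2)) (acc, c)).1
      = acc ++ (((List.range l.length).map (fun i => c * 2 ^ i)).filter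
          (fun f => decide (PySem.Int.mod m f = 0))) := by
  induction l generalizing acc c with
  | nil => simp
  | cons x t ih =>
    simp only [List.foldl_cons, List.length_cons, ih]
    rw [List.range_succ_eq_map]
    simp only [List.map_cons, List.map_map, List.filter_cons, pow_zero, mul_one]
    have hmap : ((List.range t.length).map (fun i => c * 2 ^ Nat.succ i))
        = (List.range t.length).map (fun i => (c * 2) * 2 ^ i) := by
      apply List.map_congr_left; intro i _; rw [pow_succ]; ring
    by_cases h : PySem.Int.mod m c = 0
    · simp only [Function.comp_def, h, decide_true, if_pos]
      rw [hmap]; simp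
    · simp only [Function.comp_def, h, decide_false]
      rw [hmap]; simp

lemma pv_mem_AB (m s : Int) (hs : 1 ≤ s) (x : Int) :
    (x ∈ (PySem.List.pyRange (s - 1) (-1) (-1)).map (fun k => pvReduceF m (2 ^ k.toNat))) ↔
      x ∈ ((List.range s.toNat).map (fun i => (1:Int) * 2 ^ i)).filter
          (fun f => decide (PySem.Int.mod m f = 0)) := by
  simp only [List.mem_map, List.mem_filter, List.mem_range, PySem.List.mem_pyRange_neg_one,
    PySem.Int.mod_eq_zero_iff_dvd, one_mul, decide_eq_true_eq]
  constructor
  · rintro ⟨k, ⟨hk1, hk2⟩, rfl⟩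
    obtain ⟨j, hj, he, hd⟩ := pvReduceF_pow m k.toNat
    exact ⟨⟨j, by omega, he.symm⟩, he ▸ hd⟩
  · rintro ⟨⟨i, hi, rfl⟩, hd⟩
    refine ⟨(i : Int), ⟨by omega, by omega⟩, ?_⟩
    rw [Int.toNat_natCast]
    exact pvReduceF_of_dvd m _ hd

theorem build_stage_bins_py_spec : Claim_equal_build_stage_bins_py := by
  intro m s _ hs
  have hs1 : 1 ≤ s := hs
  unfold Spec_build_stage_bins_py build_stage_bins_py build_stage_bins_py_alt
  simp only []
  -- rewrite A's factors loop as a map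
  rw [PySem.List.foldl_append_singleton_eq_map, List.nil_append]
  -- rewrite B's loop
  rw [pv_loopB, List.nil_append, PySem.List.length_pyRange_one]
  set FA := (PySem.List.pyRange (s - 1) (-1) (-1)).map (fun k => pvReduceF m (2 ^ k.toNat)) with hFA
  set FB := ((List.range (s - 0).toNat).map (fun i => (1:Int) * 2 ^ i)).filter
      (fun f => decide (PySem.Int.mod m f = 0)) with hFB
  have hmemAB : ∀ x, x ∈ FA ↔ x ∈ FB := by
    intro x; rw [hFA, hFB]
    simpa using pv_mem_AB m s hs1 x
  have h1A : (1:Int) ∈ FA := by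
    rw [hFA]
    refine List.mem_map.mpr ⟨0, ?_, ?_⟩
    · rw [PySem.List.mem_pyRange_neg_one]; omega
    · simpa using pvReduceF_of_dvd m 1 (one_dvd m)
  set F' := PySem.List.sorted (PySem.Set.ofList FA) (fun x => x) true with hF'
  have hmemF' : ∀ y, y ∈ F' ↔ y ∈ FA := by
    intro y; rw [hF', PySem.List.mem_sorted, PySem.Set.mem_ofList]
  have h1F' : (1:Int) ∈ F' := (hmemF' 1).mpr h1A
  have hne : F' ≠ [] := by intro h; rw [h] at h1F'; exact absurd h1F' (List.not_mem_nil)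
  rw [PySem.List.pyGet?_neg_one]
  obtain ⟨last, hlast⟩ : ∃ y, F'.getLast? = some y := by
    cases hF : F'.getLast? with
    | none => exact absurd (List.getLast?_eq_none_iff.mp hF) hne
    | some y => exact ⟨y, rfl⟩
  rw [hlast]
  -- the final lists are sorted deduplications of lists with the same members
  have key : ∀ (F'' : List Int), (∀ x, x ∈ F'' ↔ x ∈ FA) →
      PySem.List.sorted (PySem.Set.ofList (F''.map (fun f => PySem.Int.floordiv m f))) (fun x => x) false
        = PySem.List.sorted (PySem.Set.ofList (FB.map (fun f => PySem.Int.floordiv m f))) (fun x => x) false := by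
    intro F'' hmem
    rw [PySem.List.sorted_id_eq_sorted_id_iff_perm]
    rw [List.perm_ext_iff_of_nodup (PySem.Set.nodup_ofList _) (PySem.Set.nodup_ofList _)]
    intro a
    simp only [PySem.Set.mem_ofList, List.mem_map]
    constructor
    · rintro ⟨f, hf, rfl⟩; exact ⟨f, (hmemAB f).mp ((hmem f).mp hf), rfl⟩
    · rintro ⟨f, hf, rfl⟩; exact ⟨f, (hmem f).mpr ((hmemAB f).mpr hf), rfl⟩
  split
  next heq => exact absurd heq (by simp)
  next last' heq =>
    split
    · -- last' ≠ 1 : Python appends 1, which is already a member of FA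
      apply key
      intro x
      simp only [List.mem_append, List.mem_singleton]
      constructor
      · rintro (h | rfl)
        · exact (hmemF' x).mp h
        · exact h1A
      · exact fun h => Or.inl ((hmemF' x).mpr h)
    · exact key _ hmemF'
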